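-- pv_equiv track=rewrite | github.com/felsenhower/hexadoku-ocr | read_hexadoku.py | is_valid_part
-- ===== SOURCE A (Python) =====
-- def is_valid_part(row):
--     occurences = [0 for i in range(16)]
--     for chr in row:
--         if len(chr) != 1:
--             return False
--         try:
--             corresponding = int("0x" + chr, 0)
--         except:
--             return False
--         occurences[corresponding] += 1
--     for i in occurences:
--         if i != 1:
--             return False
--     return True
-- ===== SOURCE B (Python) =====
-- def is_valid_part(row):
--     return (len(row) == 16
--             and all(len(c) == 1 for c in row)
--             and {c.lower() for c in row} == set("0123456789abcdef"))
-- ===== Notes on version B (the rewrite author's own statement) =====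
-- stated objective: simpler
-- what changed: Replaces A's parse-and-count loop (try int('0x'+c,0), 16-bucket array, final bucket scan) with a loop-free formulation: len(row) == 16, all cells length 1, and lowered-cell-set equality with set('0123456789abcdef').
import Mathlib
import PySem

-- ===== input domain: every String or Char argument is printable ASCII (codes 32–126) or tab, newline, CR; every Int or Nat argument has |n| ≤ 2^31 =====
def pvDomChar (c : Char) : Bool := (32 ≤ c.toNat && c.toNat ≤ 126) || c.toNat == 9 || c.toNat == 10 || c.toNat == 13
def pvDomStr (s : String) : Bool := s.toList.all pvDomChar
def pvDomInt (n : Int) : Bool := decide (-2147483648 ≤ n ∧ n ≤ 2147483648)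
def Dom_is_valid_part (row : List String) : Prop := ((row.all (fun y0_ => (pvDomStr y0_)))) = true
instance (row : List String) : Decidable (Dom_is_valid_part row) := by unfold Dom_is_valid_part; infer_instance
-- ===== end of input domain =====

-- B replaces A's parse-and-count loop with a loop-free formulation: length check,
-- all-cells-length-1 check, and lowered-cell-set equality with set("0123456789abcdef");
-- objective: simpler.

-- ===== PORT A =====
-- int("0x" + c, 0) for a single printable-ASCII char c: hex digit value, none = ValueError
-- (exact on the stated ASCII domain: base-0 parsing of "0x"+c succeeds iff c is a hex digit)
def pvHexVal? (c : Char) : Option Nat :=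
  match c with
  | '0' => some 0 | '1' => some 1 | '2' => some 2 | '3' => some 3
  | '4' => some 4 | '5' => some 5 | '6' => some 6 | '7' => some 7
  | '8' => some 8 | '9' => some 9
  | 'a' => some 10 | 'b' => some 11 | 'c' => some 12 | 'd' => some 13
  | 'e' => some 14 | 'f' => some 15
  | 'A' => some 10 | 'B' => some 11 | 'C' => some 12 | 'D' => some 13
  | 'E' => some 14 | 'F' => some 15
  | _ => none

-- int("0x" + s, 0) for a length-1 string s (the guard ensures length 1 before this is used)
def pvParseHex1? (s : String) : Option Nat :=
  match s.toList with
  | [c] => pvHexVal? c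
  | _ => none

-- A's first loop: carry the 16-element occurrence list; return False on a bad cell
def pvLoopA : List String → List Int → Bool
  | [], occ => occ.all (fun i => i == 1)          -- A's second loop + final return True
  | s :: rest, occ =>
    if PySem.Str.len s ≠ 1 then false
    else
      match pvParseHex1? s with
      | none => false
      | some v => pvLoopA rest (occ.set v (occ[v]! + 1))

def is_valid_part (row : List String) : Bool :=
  pvLoopA row (List.replicate 16 0)

-- ===== PORT B =====
-- B (loop-free): len(row) == 16 and all(len(c) == 1 for c in row)
--                and {c.lower() for c in row} == set("0123456789abcdef")
def is_valid_part_alt (row : List String) : Bool :=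
  decide (row.length = 16)
  && row.all (fun c => PySem.Str.len c == 1)
  && PySem.Set.equal (PySem.Set.ofList (row.map PySem.Str.lower))
       (PySem.Set.ofList (("0123456789abcdef".toList).map (fun c => String.ofList [c])))

-- ===== PRECONDITION & SPEC =====
def Spec_is_valid_part (row : List String) (out : Bool) : Prop := out = is_valid_part_alt row
instance (row : List String) (out : Bool) : Decidable (Spec_is_valid_part row out) := by unfold Spec_is_valid_part; infer_instance

-- ===== CLAIM (what is proved, stated in full; the proofs are below) =====
def Claim_equal_is_valid_part : Prop := ∀ (row : List String), Dom_is_valid_part row → Spec_is_valid_part row (is_valid_part row)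

-- ===== LEMMAS AND PROOFS =====

def pvHexChars : List Char := "0123456789abcdef".toList

def pvHexStrs : List String := pvHexChars.map (fun c => String.ofList [c])

def pvHexStr (v : Nat) : String := String.ofList [pvHexChars.getD v ' ']

-- A's occurrence list after processing cells with values vals
def pvCounts (vals : List Nat) : List Int :=
  (List.range 16).map (fun i => ((vals.count i : Nat) : Int))

-- all cells parse (A's loop reaches the final scan) and these are the values
def pvParseAll : List String → Option (List Nat)
  | [] => some []
  | s :: rest =>
    if PySem.Str.len s ≠ 1 then none
    else
      match pvParseHex1? s with
      | none => none
      | some v => (pvParseAll rest).map (v :: ·)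

theorem pvHexVal?_lt (c : Char) (v : Nat) (h : pvHexVal? c = some v) : v < 16 := by
  unfold pvHexVal? at h
  split at h <;> simp_all <;> omega

theorem pvParseHex1?_lt (s : String) (v : Nat) (h : pvParseHex1? s = some v) : v < 16 := by
  unfold pvParseHex1? at h
  split at h
  · exact pvHexVal?_lt _ _ h
  · exact absurd h (by simp)

theorem pvCharEq (c d : Char) (h : c.toNat = d.toNat) : c = d :=
  Char.ext (UInt32.toNat_inj.mp h)

-- chars in the three hex ranges all parse
set_option maxRecDepth 8192 in
theorem pvHexVal?_of_range (ch : Char)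
    (hr : (48 ≤ ch.toNat ∧ ch.toNat ≤ 57) ∨ (97 ≤ ch.toNat ∧ ch.toNat ≤ 102) ∨
      (65 ≤ ch.toNat ∧ ch.toNat ≤ 70)) :
    pvHexVal? ch ≠ none := by
  have hlt : ch.toNat < 55296 := by omega
  have hform : ch = Char.ofNat ch.toNat :=
    (pvCharEq _ _ (by rw [Char.toNat_ofNat, if_pos (Or.inl hlt)])).symm
  obtain ⟨n, hn⟩ : ∃ n, ch.toNat = n := ⟨_, rfl⟩
  rw [hn] at hform hr
  rcases hr with ⟨h1, h2⟩ | ⟨h1, h2⟩ | ⟨h1, h2⟩ <;>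
    (subst hform; interval_cases n <;> decide)

theorem pvHexChars_range : ∀ d ∈ pvHexChars,
    (48 ≤ d.toNat ∧ d.toNat ≤ 57) ∨ (97 ≤ d.toNat ∧ d.toNat ≤ 102) := by
  intro d hd
  rw [show pvHexChars = ['0','1','2','3','4','5','6','7','8','9','a','b','c','d','e','f'] from rfl] at hd
  fin_cases hd <;> decide

-- if the parse fails, the lowered char is not a hex digit
theorem pvHexVal?_none (ch : Char) (h : pvHexVal? ch = none) :
    PySem.Chars.lowerChar ch ∉ pvHexChars := by
  intro hmem
  have hr := pvHexChars_range _ hmem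
  apply pvHexVal?_of_range ch ?_ h
  unfold PySem.Chars.lowerChar PySem.Chars.isupper at hr
  by_cases hu : ('A' ≤ ch ∧ ch ≤ 'Z')
  · have h1 : 65 ≤ ch.toNat := by have := hu.1; simp [Char.le_def] at this; exact this
    have h2 : ch.toNat ≤ 90 := by have := hu.2; simp [Char.le_def] at this; exact this
    rw [if_pos (by simp [hu.1, hu.2]), Char.toNat_ofNat, if_pos (Or.inl (by omega))] at hr
    right; right; omega
  · rw [if_neg (by by_contra hc; simp at hc; exact hu ⟨hc.1, hc.2⟩)] at hr
    omega

-- if the parse succeeds with value v, the lowered cell is the v-th hex-digit string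
theorem pvHexVal?_some (ch : Char) (v : Nat) (h : pvHexVal? ch = some v) :
    PySem.Chars.lowerChar ch = pvHexChars.getD v ' ' := by
  unfold pvHexVal? at h
  split at h <;> first
    | (injection h with h'; subst h'; decide)
    | exact absurd h (by simp)

theorem pvLower_eq (s : String) : PySem.Str.lower s = String.ofList (s.toList.map PySem.Chars.lowerChar) := by
  simp [PySem.Str.lower, PySem.Chars.lower]

theorem pvParse_some (s : String) (v : Nat) (h : pvParseHex1? s = some v) :
    PySem.Str.lower s = pvHexStr v := by
  unfold pvParseHex1? at h
  split at h
  · rename_i c heq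
    rw [pvLower_eq, heq]
    simp [pvHexStr, pvHexVal?_some c v h]
  · exact absurd h (by simp)

theorem pvParse_none (s : String) (h1 : s.toList.length = 1) (h2 : pvParseHex1? s = none) :
    PySem.Str.lower s ∉ pvHexStrs := by
  intro hmem
  rcases List.mem_map.mp hmem with ⟨d, hd, hds⟩
  obtain ⟨c, hc⟩ : ∃ c, s.toList = [c] := by
    cases hs : s.toList with
    | nil => simp [hs] at h1
    | cons a t => cases t with
      | nil => exact ⟨a, rfl⟩
      | cons b u => simp [hs] at h1
  unfold pvParseHex1? at h2
  rw [hc] at h2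
  have hlow : PySem.Str.lower s = String.ofList [PySem.Chars.lowerChar c] := by
    rw [pvLower_eq, hc]; rfl
  rw [hlow] at hds
  have hdc : d = PySem.Chars.lowerChar c := by
    have := congrArg String.toList hds
    simpa [String.toList_ofList] using this
  exact pvHexVal?_none c h2 (hdc ▸ hd)

-- incrementing bucket v is appending v to the value list, at the count level
theorem pv_step (vals : List Nat) (v : Nat) (hv : v < 16) :
    (pvCounts vals).set v (((pvCounts vals)[v]!) + 1) = pvCounts (vals ++ [v]) := by
  have hidx : ((pvCounts vals)[v]!) = ((vals.count v : Nat) : Int) := by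
    have hvlen : v < (pvCounts vals).length := by simp [pvCounts]; omega
    rw [List.getElem!_eq_getElem?_getD, List.getElem?_eq_getElem hvlen]
    simp [pvCounts]
  rw [hidx]
  apply List.ext_getElem (by simp [pvCounts])
  intro j hj hj'
  have hj16 : j < 16 := by simpa [pvCounts] using hj'
  rw [List.getElem_set]
  simp only [pvCounts, List.getElem_map, List.getElem_range]
  by_cases hjv : j = v
  · subst hjv
    simp [List.count_append]
  · rw [if_neg (by omega)]
    rw [List.count_append]
    simp only [List.count_cons, List.count_nil]
    have hne : ¬ ((v : Nat)) = ((j : Nat)) := by omega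
    simp [hne]
-- A's loop in terms of pvParseAll
theorem pvLoopA_eq (rest : List String) : ∀ (vals : List Nat),
    pvLoopA rest (pvCounts vals)
      = match pvParseAll rest with
        | none => false
        | some ws => (pvCounts (vals ++ ws)).all (fun i => i == 1) := by
  induction rest with
  | nil => intro vals; simp [pvLoopA, pvParseAll]
  | cons s rest ih =>
    intro vals
    simp only [pvLoopA, pvParseAll]
    split
    · rfl
    · cases hp : pvParseHex1? s with
      | none => rfl
      | some v =>
        have hv : v < 16 := pvParseHex1?_lt _ _ hp
        dsimp only
        rw [pv_step vals v hv, ih (vals ++ [v])]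
        cases hq : pvParseAll rest with
        | none => rfl
        | some ws =>
          simp only [Option.map_some]
          have hcc : pvCounts ((vals ++ [v]) ++ ws) = pvCounts (vals ++ v :: ws) := by
            apply List.map_congr_left
            intro i _
            simp only [List.count_append, List.count_cons, List.count_nil]
            push_cast
            omega
          rw [hcc]

theorem pvCounts_nil : pvCounts [] = List.replicate 16 0 := by decide

-- pvParseAll collects exactly A's parsed values and B's surface facts
theorem pvParseAll_some (row : List String) (vs : List Nat) (h : pvParseAll row = some vs) :
    row.map PySem.Str.lower = vs.map pvHexStr ∧ (∀ v ∈ vs, v < 16) ∧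
      (∀ c ∈ row, c.toList.length = 1) := by
  induction row generalizing vs with
  | nil =>
    simp [pvParseAll] at h
    subst h; simp
  | cons s rest ih =>
    unfold pvParseAll at h
    split at h
    · exact absurd h (by simp)
    · rename_i hlen
      cases hp : pvParseHex1? s with
      | none => rw [hp] at h; exact absurd h (by simp)
      | some v =>
        rw [hp] at h
        cases hq : pvParseAll rest with
        | none => rw [hq] at h; exact absurd h (by simp)
        | some ws =>
          rw [hq] at h
          simp at h
          subst h
          obtain ⟨ih1, ih2, ih3⟩ := ih ws hq
          refine ⟨?_, ?_, ?_⟩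
          · simp [ih1, pvParse_some s v hp]
          · intro x hx
            rcases List.mem_cons.mp hx with rfl | hx
            · exact pvParseHex1?_lt _ _ hp
            · exact ih2 x hx
          · intro c hc
            rcases List.mem_cons.mp hc with rfl | hc
            · have : PySem.Str.len c = 1 := by omega
              simpa [PySem.Str.len] using this
            · exact ih3 c hc

theorem pvParseAll_none (row : List String) (h : pvParseAll row = none) :
    ∃ c ∈ row, c.toList.length ≠ 1 ∨ (c.toList.length = 1 ∧ pvParseHex1? c = none) := by
  induction row with
  | nil => simp [pvParseAll] at h
  | cons s rest ih =>
    unfold pvParseAll at h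
    split at h
    · rename_i hlen
      refine ⟨s, by simp, Or.inl ?_⟩
      intro hc
      exact hlen (by simp [PySem.Str.len, hc])
    · rename_i hlen
      cases hp : pvParseHex1? s with
      | none =>
        refine ⟨s, by simp, Or.inr ⟨?_, hp⟩⟩
        have hlenA : (s.toList.length : Int) = 1 := by
          simpa [PySem.Str.len] using not_not.mp hlen
        exact_mod_cast hlenA
      | some v =>
        rw [hp] at h
        cases hq : pvParseAll rest with
        | none =>
          obtain ⟨c, hc, hor⟩ := ih hq
          exact ⟨c, by simp [hc], hor⟩
        | some ws => rw [hq] at h; simp at h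

theorem pvHexStr_mem (v : Nat) (hv : v < 16) : pvHexStr v ∈ pvHexStrs := by
  interval_cases v <;> decide

theorem pvHexStr_inj (v w : Nat) (hv : v < 16) (hw : w < 16) (h : pvHexStr v = pvHexStr w) : v = w := by
  interval_cases v <;> interval_cases w <;> simp_all <;> revert h <;> decide

-- counts all one ↔ perm of range 16
theorem pv_counts_iff (vs : List Nat) (hmem : ∀ v ∈ vs, v < 16) :
    ((pvCounts vs).all (fun i => i == 1) = true) ↔ vs.Perm (List.range 16) := by
  constructor
  · intro h
    have hcnt : ∀ i : Nat, i < 16 → vs.count i = 1 := by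
      intro i hi
      have := List.all_eq_true.mp h _ (List.mem_map_of_mem (List.mem_range.mpr hi))
      simp at this
      omega
    rw [List.perm_iff_count]
    intro a
    by_cases ha : a < 16
    · rw [hcnt a ha, List.count_eq_one_of_mem (List.nodup_range) (List.mem_range.mpr ha)]
    · rw [List.count_eq_zero.mpr (fun hx => ha (hmem a hx)),
          List.count_eq_zero.mpr (fun hx => ha (List.mem_range.mp hx))]
  · intro h
    apply List.all_eq_true.mpr
    intro x hx
    rcases List.mem_map.mp hx with ⟨i, hi, rfl⟩
    have : vs.count i = (List.range 16).count i := List.perm_iff_count.mp h i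
    rw [List.count_eq_one_of_mem (List.nodup_range) hi] at this
    simp [this]

-- perm of range 16 ↔ 16 cells, every value present
theorem pv_perm_iff (vs : List Nat) (hmem : ∀ v ∈ vs, v < 16) :
    vs.Perm (List.range 16) ↔ (vs.length = 16 ∧ ∀ d < 16, d ∈ vs) := by
  constructor
  · intro h
    refine ⟨by simpa using h.length_eq, fun d hd => (h.mem_iff).mpr (List.mem_range.mpr hd)⟩
  · rintro ⟨hlen, hall⟩
    have hsub : (List.range 16).toFinset ⊆ vs.toFinset := by
      intro d hd
      rw [List.mem_toFinset] at *
      exact hall d (List.mem_range.mp hd)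
    have hcard : 16 ≤ vs.toFinset.card := by
      have := Finset.card_le_card hsub
      simpa using this
    have hdedup : vs.dedup.length = 16 := by
      have h1 : vs.dedup.length ≤ vs.length := (List.dedup_sublist vs).length_le
      rw [← List.card_toFinset] at h1 ⊢
      omega
    have hnd : vs.Nodup := by
      rw [← List.dedup_eq_self]
      exact List.Sublist.eq_of_length (List.dedup_sublist vs) (by omega)
    rw [List.perm_ext_iff_of_nodup hnd List.nodup_range]
    intro a
    constructor
    · intro ha; exact List.mem_range.mpr (hmem a ha)
    · intro ha; exact hall a (List.mem_range.mp ha)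

-- ===== VERDICT (by name: the statement is the Claim_ definition above) =====
theorem is_valid_part_spec : Claim_equal_is_valid_part := by
  intro row _
  unfold Spec_is_valid_part is_valid_part is_valid_part_alt
  rw [← pvCounts_nil, pvLoopA_eq row []]
  have hhex : ("0123456789abcdef".toList).map (fun c => String.ofList [c]) = pvHexStrs := rfl
  rw [hhex]
  cases hq : pvParseAll row with
  | some vs =>
    obtain ⟨hmap, hlt, hlen1⟩ := pvParseAll_some row vs hq
    dsimp only
    have hlenvs : vs.length = row.length := by
      have := congrArg List.length hmap; simpa using this.symm
    have hall : (row.all (fun c => PySem.Str.len c == 1)) = true := by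
      apply List.all_eq_true.mpr
      intro c hc
      simp [PySem.Str.len, hlen1 c hc]
    rw [hall]
    rw [Bool.eq_iff_iff]
    simp only [List.nil_append, Bool.and_true, Bool.and_eq_true, decide_eq_true_eq]
    rw [pv_counts_iff vs hlt, pv_perm_iff vs hlt]
    constructor
    · rintro ⟨h16, hcov⟩
      refine ⟨by omega, ?_⟩
      rw [PySem.Set.equal_iff]
      intro x
      rw [PySem.Set.mem_ofList, PySem.Set.mem_ofList, hmap]
      constructor
      · intro hx
        rcases List.mem_map.mp hx with ⟨v, hv, rfl⟩
        exact pvHexStr_mem v (hlt v hv)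
      · intro hx
        rcases List.mem_map.mp (show x ∈ pvHexChars.map (fun c => String.ofList [c]) from hx) with ⟨d, hd, rfl⟩
        obtain ⟨i, hi16, hieq⟩ : ∃ i, i < 16 ∧ pvHexChars.getD i ' ' = d := by
          rcases List.getElem_of_mem hd with ⟨i, hilen, hie⟩
          exact ⟨i, by simpa [pvHexChars] using hilen, by rw [List.getD_eq_getElem?_getD, List.getElem?_eq_getElem hilen]; simp [hie]⟩
        have : pvHexStr i = String.ofList [d] := by rw [pvHexStr, hieq]
        rw [← this]
        exact List.mem_map_of_mem (hcov i hi16)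
    · rintro ⟨h16, hset⟩
      refine ⟨by omega, ?_⟩
      intro d hd
      rw [PySem.Set.equal_iff] at hset
      have := (hset (pvHexStr d)).mpr
      rw [PySem.Set.mem_ofList, PySem.Set.mem_ofList, hmap] at this
      have hmem' := this (pvHexStr_mem d hd)
      rcases List.mem_map.mp hmem' with ⟨v, hv, hveq⟩
      have : v = d := pvHexStr_inj v d (hlt v hv) hd hveq
      exact this ▸ hv
  | none =>
    dsimp only
    obtain ⟨c, hc, hor⟩ := pvParseAll_none row hq
    symm
    rcases hor with hbad | ⟨h1, hnone⟩
    · apply Bool.and_eq_false_iff.mpr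
      left
      apply Bool.and_eq_false_iff.mpr
      right
      apply (Bool.not_eq_true _).mp
      intro hall
      have := List.all_eq_true.mp hall c hc
      simp [PySem.Str.len] at this
      exact hbad (by simpa using this)
    · apply Bool.and_eq_false_iff.mpr
      right
      apply (Bool.not_eq_true _).mp
      intro heq
      have := (PySem.Set.equal_iff _ _).mp heq (PySem.Str.lower c)
      rw [PySem.Set.mem_ofList, PySem.Set.mem_ofList] at this
      have hmem := this.mp (List.mem_map_of_mem hc)
      exact pvParse_none c h1 hnone hmem
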